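-- pv_equiv track=rewrite | github.com/safiqsindha/TheEngine | engine_proxy/pricing.py | normalize_model
-- ===== SOURCE A (Python) =====
-- PRICING = {
--     "claude-haiku-4-5":   {"input": 1.00,  "output":  5.00},
--     "claude-sonnet-4-5":  {"input": 3.00,  "output": 15.00},
--     "claude-sonnet-4-6":  {"input": 3.00,  "output": 15.00},
--     "claude-opus-4-5":    {"input": 15.00, "output": 75.00},
--     "claude-opus-4-6":    {"input": 15.00, "output": 75.00},
-- }
--
-- def normalize_model(model: str) -> str:
--     """Strip the optional date suffix from a model id.
--
--     "claude-haiku-4-5-20251001" -> "claude-haiku-4-5"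
--     """
--     if not model:
--         return ""
--     # Direct hit
--     if model in PRICING:
--         return model
--     # Strip trailing -YYYYMMDD if present
--     if len(model) > 9 and model[-9] == "-" and model[-8:].isdigit():
--         base = model[:-9]
--         if base in PRICING:
--             return base
--     # Prefix match (handles unforeseen suffixes)
--     for known in PRICING:
--         if model.startswith(known):
--             return known
--     return model
-- ===== SOURCE B (Python) =====
-- PRICING = {
--     "claude-haiku-4-5":   {"input": 1.00,  "output":  5.00},
--     "claude-sonnet-4-5":  {"input": 3.00,  "output": 15.00},
--     "claude-sonnet-4-6":  {"input": 3.00,  "output": 15.00},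
--     "claude-opus-4-5":    {"input": 15.00, "output": 75.00},
--     "claude-opus-4-6":    {"input": 15.00, "output": 75.00},
-- }
--
-- def normalize_model(model: str) -> str:
--     """Strip the optional date suffix from a model id.
--
--     One uniform rule replaces A's three special-cased branches: the answer is
--     the unique PRICING key that the input begins with (found by comparing the
--     key against the equal-length head slice of the input), else the input
--     itself.  A direct hit and a stripped -YYYYMMDD base are both full PRICING
--     keys that are prefixes of the input, and no key is a prefix of another,
--     so this first match reproduces every branch of A.
--     """
--     if not model:
--         return ""
--     hit = next((k for k in PRICING if model[:len(k)] == k), None)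
--     return model if hit is None else hit
-- ===== Notes on version B (the rewrite author's own statement) =====
-- stated objective: simpler
-- what changed: Replaced A's three special-cased branches (dict membership, manual -YYYYMMDD suffix strip with a second dict lookup, then a startswith prefix loop) by one uniform first-match search that compares each PRICING key against the equal-length head slice of the input; equivalent because every key A's first two branches can return is itself a prefix of the input and no PRICING key is a prefix of another.
import Mathlib
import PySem

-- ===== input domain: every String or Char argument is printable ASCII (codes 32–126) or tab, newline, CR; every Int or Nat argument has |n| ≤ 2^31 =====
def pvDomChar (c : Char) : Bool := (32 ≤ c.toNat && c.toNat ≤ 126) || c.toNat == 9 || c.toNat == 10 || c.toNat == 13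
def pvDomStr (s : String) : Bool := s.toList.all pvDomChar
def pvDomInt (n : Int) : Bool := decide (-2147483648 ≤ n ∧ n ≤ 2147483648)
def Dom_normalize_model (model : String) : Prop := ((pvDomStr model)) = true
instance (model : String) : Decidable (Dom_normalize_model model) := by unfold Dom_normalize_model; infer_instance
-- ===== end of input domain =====

-- B replaces A's three special-cased branches by one uniform first-match search comparing each
-- PRICING key with the equal-length head slice of the input (objective: simpler).

-- the keys of PRICING, in insertion order (shared constant)
def pricingKeys : List String :=
  ["claude-haiku-4-5", "claude-sonnet-4-5", "claude-sonnet-4-6",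
   "claude-opus-4-5", "claude-opus-4-6"]

-- ===== PORT A =====
-- A's trailing loop: 'for known in PRICING: if model.startswith(known): return known'
def prefixScan : List String → String → String
  | [], m => m
  | k :: ks, m => if PySem.Str.startswith m k then k else prefixScan ks m

def normalize_model (model : String) : String :=
  if model = "" then ""
  else if pricingKeys.contains model then model
  else if 9 < PySem.Str.len model ∧ PySem.Str.pyGet? model (-9) = some '-' ∧
          PySem.Str.strIsdigit (PySem.Str.slice model (some (-8)) none) = true then
    let base := PySem.Str.slice model none (some (-9))
    if pricingKeys.contains base then base
    else prefixScan pricingKeys model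
  else prefixScan pricingKeys model

-- ===== PORT B =====
-- 'next((k for k in PRICING if model[:len(k)] == k), None)'
def findKey : List String → String → Option String
  | [], _ => none
  | k :: ks, m =>
      if PySem.Str.slice m none (some ((PySem.Str.len k : Int))) = k then some k
      else findKey ks m

def normalize_model_alt (model : String) : String :=
  if model = "" then ""
  else match findKey pricingKeys model with
       | none => model
       | some k => k

-- ===== PRECONDITION & SPEC =====
def Spec_normalize_model (model : String) (out : String) : Prop := out = normalize_model_alt model
instance (model : String) (out : String) : Decidable (Spec_normalize_model model out) := by unfold Spec_normalize_model; infer_instance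

-- ===== CLAIM =====
def Claim_equal_normalize_model : Prop := ∀ (model : String), Dom_normalize_model model → Spec_normalize_model model (normalize_model model)

-- ===== LEMMAS AND PROOFS =====

-- each step of A's loop and of B's search tests the same condition: 'model starts with k'
theorem pv_step (m k : String) :
    (PySem.Str.slice m none (some ((PySem.Str.len k : Int))) = k) ↔
      PySem.Str.startswith m k = true := by
  simp only [PySem.Str.startswith_eq, PySem.Chars.startswith_iff]
  constructor
  · intro h
    have := congrArg String.toList h
    simp only [PySem.Str.toList_slice, PySem.Chars.slice_eq_listSlice, PySem.Str.len_eq,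
      PySem.List.slice_to_natCast] at this
    rw [← this]
    exact List.take_prefix _ _
  · intro h
    apply String.ext  -- String equality from data equality
    simp only [PySem.Str.toList_slice, PySem.Chars.slice_eq_listSlice, PySem.Str.len_eq,
      PySem.List.slice_to_natCast]
    exact (List.prefix_iff_eq_take.mp h).symm
    
-- A's loop and B's search agree on every key list
theorem pv_scan_eq_find (ks : List String) (m : String) :
    prefixScan ks m = (findKey ks m).getD m := by
  induction ks with
  | nil => rfl
  | cons k ks ih =>
    simp only [prefixScan, findKey]
    by_cases h : PySem.Str.startswith m k = true
    · rw [if_pos h, if_pos ((pv_step m k).mpr h)]; rfl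
    · rw [if_neg (by simpa using h), if_neg (fun hc => h ((pv_step m k).mp hc))]
      exact ih

-- a list whose first min-length segment differs from b's cannot be a prefix of b ++ t
theorem pv_not_prefix_append_of_take_ne {α : Type} (k b t : List α)
    (h : k.take (min k.length b.length) ≠ b.take (min k.length b.length)) :
    ¬ k <+: b ++ t := by
  rintro ⟨r, hr⟩
  apply h
  have h2 := congrArg (List.take (min k.length b.length)) hr
  rwa [List.take_append_of_le_length (Nat.min_le_left _ _),
       List.take_append_of_le_length (Nat.min_le_right _ _)] at h2

theorem pv_startswith_true (m b : String) (t : List Char) (hm : m.toList = b.toList ++ t) :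
    PySem.Str.startswith m b = true := by
  simp only [PySem.Str.startswith_eq]
  rw [PySem.Chars.startswith_iff, hm]
  exact List.prefix_append _ _

theorem pv_startswith_false (m k b : String) (t : List Char) (hm : m.toList = b.toList ++ t)
    (h : k.toList.take (min k.toList.length b.toList.length) ≠
         b.toList.take (min k.toList.length b.toList.length)) :
    PySem.Str.startswith m k = false := by
  simp only [PySem.Str.startswith_eq]
  rw [Bool.eq_false_iff]
  intro hc
  rw [PySem.Chars.startswith_iff, hm] at hc
  exact pv_not_prefix_append_of_take_ne _ _ _ h hc

-- if model extends a PRICING key by any tail, A's prefix scan returns exactly that key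
-- (no PRICING key agrees with another on their common-length prefix)
theorem pv_scan_base (m b : String) (t : List Char) (hb : b ∈ pricingKeys)
    (hm : m.toList = b.toList ++ t) : prefixScan pricingKeys m = b := by
  simp only [pricingKeys, List.mem_cons, List.not_mem_nil, or_false] at hb
  rcases hb with hb | hb | hb | hb | hb <;> subst hb <;>
    simp only [pricingKeys, prefixScan]
  · rw [pv_startswith_true m "claude-haiku-4-5" t hm]
    simp
  · rw [pv_startswith_false m "claude-haiku-4-5" "claude-sonnet-4-5" t hm (by decide),
        pv_startswith_true m "claude-sonnet-4-5" t hm]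
    simp
  · rw [pv_startswith_false m "claude-haiku-4-5" "claude-sonnet-4-6" t hm (by decide),
        pv_startswith_false m "claude-sonnet-4-5" "claude-sonnet-4-6" t hm (by decide),
        pv_startswith_true m "claude-sonnet-4-6" t hm]
    simp
  · rw [pv_startswith_false m "claude-haiku-4-5" "claude-opus-4-5" t hm (by decide),
        pv_startswith_false m "claude-sonnet-4-5" "claude-opus-4-5" t hm (by decide),
        pv_startswith_false m "claude-sonnet-4-6" "claude-opus-4-5" t hm (by decide),
        pv_startswith_true m "claude-opus-4-5" t hm]
    simp
  · rw [pv_startswith_false m "claude-haiku-4-5" "claude-opus-4-6" t hm (by decide),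
        pv_startswith_false m "claude-sonnet-4-5" "claude-opus-4-6" t hm (by decide),
        pv_startswith_false m "claude-sonnet-4-6" "claude-opus-4-6" t hm (by decide),
        pv_startswith_false m "claude-opus-4-5" "claude-opus-4-6" t hm (by decide),
        pv_startswith_true m "claude-opus-4-6" t hm]
    simp

-- ===== VERDICT =====
theorem normalize_model_spec : Claim_equal_normalize_model := by
  intro model _
  show normalize_model model = normalize_model_alt model
  have halt : normalize_model_alt model =
      if model = "" then "" else prefixScan pricingKeys model := by
    unfold normalize_model_alt
    rw [pv_scan_eq_find]
    cases findKey pricingKeys model <;> rfl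
  rw [halt]
  unfold normalize_model
  by_cases h0 : model = ""
  · simp [h0]
  simp only [h0, if_false]
  by_cases h1 : pricingKeys.contains model
  · rw [if_pos h1,
        pv_scan_base model model [] (by simpa using h1) (by simp)]
  rw [if_neg h1]
  split_ifs with h2 h3
  · have hb : PySem.Str.slice model none (some (-9)) ∈ pricingKeys := by simpa using h3
    refine (pv_scan_base model _ (model.toList.drop (model.toList.length - 9)) hb ?_).symm
    have hs : (PySem.Str.slice model none (some (-9))).toList =
        model.toList.take (model.toList.length - 9) := by
      simp [PySem.List.slice_to_neg_ofNat model.toList 9 (by omega)]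
    rw [hs, List.take_append_drop]
  · rfl
  · rfl
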